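-- pv_equiv track=rewrite | github.com/chezinski-arch/soothsayer-filters | soothsayer-filters/soothsayer-filters/update_filters.py | categorize_youtube_selectors
-- ===== SOURCE A (Python) =====
-- def categorize_youtube_selectors(raw_selectors):
--     """
--     Take a flat list of YouTube CSS selectors from filter lists
--     and attempt to categorize them into our structure.
--     """
--     skip_patterns = ["skip", "Skip"]
--     overlay_patterns = ["overlay", "text-overlay", "image-overlay", "ce-element", "suggested-action"]
--     banner_patterns = [
--         "masthead-ad", "display-ad", "promoted", "banner", "promo",
--         "in-feed-ad", "player-ads", "search-pyv", "statement-banner",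
--         "primetime", "mealbar", "companion", "ad-badge", "ad-slot"
--     ]
--
--     extra_skip = []
--     extra_overlay = []
--     extra_banner = []
--
--     for sel in raw_selectors:
--         sel_lower = sel.lower()
--         if any(p.lower() in sel_lower for p in skip_patterns):
--             extra_skip.append(sel)
--         elif any(p in sel_lower for p in overlay_patterns):
--             extra_overlay.append(sel)
--         elif any(p in sel_lower for p in banner_patterns):
--             extra_banner.append(sel)
--         else:
--             # Generic ad element — goes to banner/general bucket
--             if "ad" in sel_lower:
--                 extra_banner.append(sel)
--
--     return extra_skip, extra_overlay, extra_banner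
-- ===== SOURCE B (Python) =====
-- OVERLAY_PATTERNS = ["overlay", "text-overlay", "image-overlay", "ce-element", "suggested-action"]
-- BANNER_PATTERNS = [
--     "masthead-ad", "display-ad", "promoted", "banner", "promo",
--     "in-feed-ad", "player-ads", "search-pyv", "statement-banner",
--     "primetime", "mealbar", "companion", "ad-badge", "ad-slot",
--     "ad",  # generic ad fallback
-- ]
--
--
-- def _partition(selectors, patterns):
--     """Stable split into (selectors matching some pattern, the rest)."""
--     hit, miss = [], []
--     for sel in selectors:
--         low = sel.lower()
--         (hit if any(p in low for p in patterns) else miss).append(sel)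
--     return hit, miss
--
--
-- def categorize_youtube_selectors(raw_selectors):
--     """
--     Take a flat list of YouTube CSS selectors from filter lists
--     and attempt to categorize them into our structure.
--     """
--     # Staged sieve: each pass claims its selectors and hands the rest on.
--     skip, rest = _partition(raw_selectors, ["skip"])
--     overlay, rest = _partition(rest, OVERLAY_PATTERNS)
--     banner, _ = _partition(rest, BANNER_PATTERNS)
--     return skip, overlay, banner
-- ===== Notes on version B (the rewrite author's own statement) =====
-- stated objective: simpler
-- what changed: Replaces A's single loop with a four-way if/elif branch chain per selector by a staged sieve: three successive stable partition passes, each claiming the selectors that match its pattern list and passing the remainder on (the generic 'ad' fallback becomes just the last banner pattern).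
import Mathlib
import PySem

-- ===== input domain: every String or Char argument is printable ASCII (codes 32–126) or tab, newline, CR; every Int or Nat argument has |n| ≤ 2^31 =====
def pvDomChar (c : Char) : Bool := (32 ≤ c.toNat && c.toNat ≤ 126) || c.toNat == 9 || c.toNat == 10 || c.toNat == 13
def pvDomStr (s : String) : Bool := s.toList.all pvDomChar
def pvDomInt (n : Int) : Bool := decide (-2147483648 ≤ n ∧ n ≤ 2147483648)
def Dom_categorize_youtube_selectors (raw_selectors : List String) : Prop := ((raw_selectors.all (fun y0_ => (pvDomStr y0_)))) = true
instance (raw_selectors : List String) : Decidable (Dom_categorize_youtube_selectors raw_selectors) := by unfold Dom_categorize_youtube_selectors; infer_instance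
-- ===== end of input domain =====

-- B replaces A's single loop with a per-selector if/elif branch chain by a staged sieve:
-- three successive stable partition passes (skip, overlay, banner-with-'ad'-last),
-- each claiming its selectors and passing the remainder on (objective: simpler).

-- ===== PORT A =====
-- one step of A's loop body (the pattern lists are A's local constants)
def pvStepA (acc : List String × List String × List String) (sel : String) :
    List String × List String × List String :=
  let skip_patterns := ["skip", "Skip"]
  let overlay_patterns := ["overlay", "text-overlay", "image-overlay", "ce-element", "suggested-action"]
  let banner_patterns := ["masthead-ad", "display-ad", "promoted", "banner", "promo",
      "in-feed-ad", "player-ads", "search-pyv", "statement-banner",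
      "primetime", "mealbar", "companion", "ad-badge", "ad-slot"]
  let sel_lower := PySem.Str.lower sel
  if skip_patterns.any (fun p => PySem.Str.isIn (PySem.Str.lower p) sel_lower) then
    (acc.1 ++ [sel], acc.2.1, acc.2.2)
  else if overlay_patterns.any (fun p => PySem.Str.isIn p sel_lower) then
    (acc.1, acc.2.1 ++ [sel], acc.2.2)
  else if banner_patterns.any (fun p => PySem.Str.isIn p sel_lower) then
    (acc.1, acc.2.1, acc.2.2 ++ [sel])
  else if PySem.Str.isIn "ad" sel_lower then
    (acc.1, acc.2.1, acc.2.2 ++ [sel])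
  else acc

def categorize_youtube_selectors (raw_selectors : List String) :
    List String × List String × List String :=
  raw_selectors.foldl pvStepA ([], [], [])

-- ===== PORT B =====
def pvOverlayPats : List String :=
  ["overlay", "text-overlay", "image-overlay", "ce-element", "suggested-action"]

def pvBannerPats : List String :=
  ["masthead-ad", "display-ad", "promoted", "banner", "promo",
   "in-feed-ad", "player-ads", "search-pyv", "statement-banner",
   "primetime", "mealbar", "companion", "ad-badge", "ad-slot",
   "ad"]  -- generic ad fallback

-- stable split into (selectors matching some pattern, the rest)
def pvPartition (selectors : List String) (patterns : List String) :
    List String × List String :=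
  selectors.partition (fun sel => patterns.any (fun p => PySem.Str.isIn p (PySem.Str.lower sel)))

def categorize_youtube_selectors_alt (raw_selectors : List String) :
    List String × List String × List String :=
  let sp := pvPartition raw_selectors ["skip"]
  let op := pvPartition sp.2 pvOverlayPats
  let bp := pvPartition op.2 pvBannerPats
  (sp.1, op.1, bp.1)

-- ===== PRECONDITION & SPEC =====
def Spec_categorize_youtube_selectors (raw_selectors : List String) (out : List String × List String × List String) : Prop := out = categorize_youtube_selectors_alt raw_selectors
instance (raw_selectors : List String) (out : List String × List String × List String) : Decidable (Spec_categorize_youtube_selectors raw_selectors out) := by unfold Spec_categorize_youtube_selectors; infer_instance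

-- ===== CLAIM (what is proved, stated in full; the proofs are below) =====
def Claim_equal_categorize_youtube_selectors : Prop := ∀ (raw_selectors : List String), Dom_categorize_youtube_selectors raw_selectors → Spec_categorize_youtube_selectors raw_selectors (categorize_youtube_selectors raw_selectors)

-- ===== LEMMAS AND PROOFS =====
-- the three predicates B's sieve uses
def pSkip (sel : String) : Bool := PySem.Str.isIn "skip" (PySem.Str.lower sel)
def pOvl (sel : String) : Bool := pvOverlayPats.any (fun p => PySem.Str.isIn p (PySem.Str.lower sel))
def pBan (sel : String) : Bool := pvBannerPats.any (fun p => PySem.Str.isIn p (PySem.Str.lower sel))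

-- if-branches with equal results merge into a disjunction
lemma if_or {α : Type} (b1 b2 : Bool) (x y : α) :
    (if b1 then x else if b2 then x else y) = if (b1 || b2) then x else y := by
  cases b1 <;> simp

-- A's loop step, phrased through B's three predicates
lemma pvStepA_eq (acc : List String × List String × List String) (sel : String) :
    pvStepA acc sel =
      if pSkip sel then (acc.1 ++ [sel], acc.2.1, acc.2.2)
      else if pOvl sel then (acc.1, acc.2.1 ++ [sel], acc.2.2)
      else if pBan sel then (acc.1, acc.2.1, acc.2.2 ++ [sel])
      else acc := by
  have hskip : (["skip", "Skip"].any
      (fun p => PySem.Str.isIn (PySem.Str.lower p) (PySem.Str.lower sel))) = pSkip sel := by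
    simp [pSkip, show PySem.Chars.lower ['s','k','i','p'] = ['s','k','i','p'] from by decide,
      show PySem.Chars.lower ['S','k','i','p'] = ['s','k','i','p'] from by decide]
  have hban : pBan sel =
      ((["masthead-ad", "display-ad", "promoted", "banner", "promo",
        "in-feed-ad", "player-ads", "search-pyv", "statement-banner",
        "primetime", "mealbar", "companion", "ad-badge", "ad-slot"].any
          (fun p => PySem.Str.isIn p (PySem.Str.lower sel)))
        || PySem.Str.isIn "ad" (PySem.Str.lower sel)) := by
    simp [pBan, pvBannerPats, Bool.or_assoc]
  simp only [pvStepA]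
  rw [hskip, if_or, ← hban]
  rfl

-- A's fold equals the three staged filters
lemma foldA_eq (xs : List String) (s o b : List String) :
    xs.foldl pvStepA (s, o, b) =
      (s ++ xs.filter pSkip,
       o ++ (xs.filter (fun x => !pSkip x)).filter pOvl,
       b ++ ((xs.filter (fun x => !pSkip x)).filter (fun x => !pOvl x)).filter pBan) := by
  induction xs generalizing s o b with
  | nil => simp
  | cons x xs ih =>
    simp only [List.foldl_cons, pvStepA_eq]
    cases h1 : pSkip x
    · cases h2 : pOvl x
      · cases h3 : pBan x <;> simp [h1, h2, h3, ih, List.filter_cons]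
      · simp [h1, h2, ih, List.filter_cons]
    · simp [h1, ih, List.filter_cons]

-- ===== VERDICT (by name: the statement is the Claim_ definition above) =====
theorem categorize_youtube_selectors_spec : Claim_equal_categorize_youtube_selectors := by
  intro raw_selectors _
  unfold Spec_categorize_youtube_selectors categorize_youtube_selectors
    categorize_youtube_selectors_alt
  rw [foldA_eq]
  have hs : (fun sel => List.any ["skip"] fun p => PySem.Str.isIn p (PySem.Str.lower sel)) = pSkip := by
    funext x; simp [pSkip]
  simp only [pvPartition, List.partition_eq_filter_filter, hs, List.nil_append]
  rfl
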